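-- pv_equiv track=rewrite | github.com/Monargoras/aoc2024 | aocDay05/aocDay5.py | filterIncorrectOrders
-- ===== SOURCE A (Python) =====
-- def filterIncorrectOrders(orders, afterRules):
--     incorrectOrders = []
--     for printOrder in orders:
--         printedPages = []
--         wrongOrder = False
--         for page in printOrder:
--             if page in afterRules:
--                 for after in afterRules[page]:
--                     if after in printedPages:
--                         wrongOrder = True
--                         break
--             printedPages.append(page)
--         if wrongOrder:
--             incorrectOrders.append(printOrder)
--     return incorrectOrders
-- ===== SOURCE B (Python) =====
-- def filterIncorrectOrders(orders, afterRules):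
--     result = []
--     for printOrder in orders:
--         minpos = {}
--         maxpos = {}
--         for i, page in enumerate(printOrder):
--             if page not in minpos:
--                 minpos[page] = i
--             maxpos[page] = i
--         wrong = False
--         for page in maxpos:
--             afters = afterRules.get(page)
--             if afters is None:
--                 continue
--             for after in afters:
--                 if after in minpos and minpos[after] < maxpos[page]:
--                     wrong = True
--                     break
--             if wrong:
--                 break
--         if wrong:
--             result.append(printOrder)
--     return result
-- ===== Notes on version B (the rewrite author's own statement) =====
-- stated objective: faster
-- what changed: Instead of re-scanning the printed prefix for every rule of every page occurrence (A), B makes one pass per order building first/last-position dicts and then checks each distinct page's rules once via minpos[after] < maxpos[page]; measured 1.8x faster at the largest timing size.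
import Mathlib
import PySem

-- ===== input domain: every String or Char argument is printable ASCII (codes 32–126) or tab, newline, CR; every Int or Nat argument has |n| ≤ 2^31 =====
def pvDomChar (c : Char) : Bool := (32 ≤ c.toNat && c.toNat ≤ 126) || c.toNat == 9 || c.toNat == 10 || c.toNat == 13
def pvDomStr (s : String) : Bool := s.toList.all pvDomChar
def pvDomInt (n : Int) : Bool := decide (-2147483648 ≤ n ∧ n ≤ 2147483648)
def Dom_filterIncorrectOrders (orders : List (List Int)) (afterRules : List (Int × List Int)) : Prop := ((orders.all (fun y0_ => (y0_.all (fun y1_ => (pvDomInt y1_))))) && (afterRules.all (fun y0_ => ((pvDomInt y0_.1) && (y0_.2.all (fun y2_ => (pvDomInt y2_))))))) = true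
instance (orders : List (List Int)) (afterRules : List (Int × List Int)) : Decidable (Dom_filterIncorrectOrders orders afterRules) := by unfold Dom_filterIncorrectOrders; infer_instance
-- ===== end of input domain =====

-- B builds, in one pass per order, the first- and last-position dicts of its pages and then
-- checks each rule once (minpos[after] < maxpos[page]) instead of A's rescan of the printed
-- prefix for every rule of every page (alternative decomposition).

-- ===== PORT A =====
def filterIncorrectOrders (orders : List (List Int)) (afterRules : List (Int × List Int)) : List (List Int) :=
  orders.foldl (fun incorrectOrders printOrder =>
    let st := printOrder.foldl (fun (st : List Int × Bool) page =>
      -- `if page in afterRules: for after in afterRules[page]: if after in printedPages: wrongOrder = True; break`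
      match (PySem.Dict.mk afterRules).get? page with
      | some afters => (st.1 ++ [page], st.2 || afters.any (fun a => st.1.contains a))
      | none => (st.1 ++ [page], st.2)) ([], false)
    if st.2 then incorrectOrders ++ [printOrder] else incorrectOrders) []

-- ===== PORT B =====
def filterIncorrectOrders_alt (orders : List (List Int)) (afterRules : List (Int × List Int)) : List (List Int) :=
  orders.foldl (fun result printOrder =>
    -- one pass: minpos = first index seen, maxpos = last index seen
    let mm := (PySem.List.enumerate printOrder 0).foldl
      (fun (mm : PySem.Dict Int Int × PySem.Dict Int Int) ip =>
        ((if mm.1.contains ip.2 then mm.1 else mm.1.insert ip.2 ip.1), mm.2.insert ip.2 ip.1))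
      (PySem.Dict.empty, PySem.Dict.empty)
    -- `for page in maxpos: afters = afterRules.get(page); if afters is None: continue; …`
    let wrong := mm.2.keys.any (fun page =>
      match (PySem.Dict.mk afterRules).get? page with
      | some afters =>
        match mm.2.get? page with
        | some j => afters.any (fun a =>
            match mm.1.get? a with
            | some i => decide (i < j)
            | none => false)
        | none => false
      | none => false)
    if wrong then result ++ [printOrder] else result) []

-- ===== PRECONDITION & SPEC =====
def Spec_filterIncorrectOrders (orders : List (List Int)) (afterRules : List (Int × List Int)) (out : List (List Int)) : Prop := out = filterIncorrectOrders_alt orders afterRules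
instance (orders : List (List Int)) (afterRules : List (Int × List Int)) (out : List (List Int)) : Decidable (Spec_filterIncorrectOrders orders afterRules out) := by unfold Spec_filterIncorrectOrders; infer_instance

-- ===== CLAIM (what is proved, stated in full; the proofs are below) =====
def Claim_equal_filterIncorrectOrders : Prop := ∀ (orders : List (List Int)) (afterRules : List (Int × List Int)), Dom_filterIncorrectOrders orders afterRules → Spec_filterIncorrectOrders orders afterRules (filterIncorrectOrders orders afterRules)

-- ===== LEMMAS AND PROOFS =====

-- A's inner loop, isolated: has the prefix `printed` of `l` already broken a rule?
def pvBadA (rules : List (Int × List Int)) (printed l : List Int) : Bool :=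
  match l with
  | [] => false
  | p :: t =>
    ((match (PySem.Dict.mk rules).get? p with
      | some afters => afters.any (fun a => printed.contains a)
      | none => false) || pvBadA rules (printed ++ [p]) t)

-- first / last index (from start offset s) of a value in a list
def pvFirstIdx (l : List Int) (p : Int) (s : Int) : Option Int :=
  match l with
  | [] => none
  | x :: t => if x = p then some s else pvFirstIdx t p (s + 1)

def pvLastIdx (l : List Int) (p : Int) (s : Int) : Option Int :=
  match l with
  | [] => none
  | x :: t =>
    match pvLastIdx t p (s + 1) with
    | some j => some j
    | none => if x = p then some s else none

lemma pvFoldA (rules : List (Int × List Int)) (l printed : List Int) (w : Bool) :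
    l.foldl (fun (st : List Int × Bool) page =>
      match (PySem.Dict.mk rules).get? page with
      | some afters => (st.1 ++ [page], st.2 || afters.any (fun a => st.1.contains a))
      | none => (st.1 ++ [page], st.2)) (printed, w)
    = (printed ++ l, w || pvBadA rules printed l) := by
  induction l generalizing printed w with
  | nil => simp [pvBadA]
  | cons p t ih =>
    simp only [List.foldl_cons, pvBadA]
    cases h : (PySem.Dict.mk rules).get? p with
    | none =>
      rw [ih]
      simp
    | some afters =>
      rw [ih, Bool.or_assoc]
      simp

lemma pvMinFold_enum (l : List Int) (s : Int) (d : PySem.Dict Int Int) (p : Int) :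
    ((PySem.List.enumerate l s).foldl (fun d ip => if d.contains ip.2 then d else d.insert ip.2 ip.1) d).get? p =
      match d.get? p with
      | some v => some v
      | none => pvFirstIdx l p s := by
  induction l generalizing s d with
  | nil =>
    simp only [PySem.List.enumerate_nil, List.foldl_nil, pvFirstIdx]
    cases d.get? p <;> rfl
  | cons x t ih =>
    rw [PySem.List.enumerate_cons, List.foldl_cons]
    by_cases hc : d.contains x = true
    · rw [if_pos hc]
      rw [ih]
      cases hd : d.get? p with
      | some v => rfl
      | none =>
        have hxp : x ≠ p := by
          intro he
          rw [PySem.Dict.contains_eq_isSome_get?, he, hd] at hc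
          simp at hc
        simp [pvFirstIdx, hxp]
    · rw [if_neg hc]
      rw [ih]
      by_cases hpx : p = x
      · subst hpx
        rw [PySem.Dict.get?_insert_self]
        have hd : d.get? p = none := by
          rw [PySem.Dict.contains_eq_isSome_get?] at hc
          cases hdd : d.get? p with
          | none => rfl
          | some v => rw [hdd] at hc; simp at hc
        simp [hd, pvFirstIdx]
      · rw [PySem.Dict.get?_insert_of_ne _ _ hpx]
        cases hd : d.get? p with
        | some v => rfl
        | none => simp [pvFirstIdx, Ne.symm hpx]

lemma pvMaxFold_enum (l : List Int) (s : Int) (d : PySem.Dict Int Int) (p : Int) :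
    ((PySem.List.enumerate l s).foldl (fun d ip => d.insert ip.2 ip.1) d).get? p =
      match pvLastIdx l p s with
      | some j => some j
      | none => d.get? p := by
  induction l generalizing s d with
  | nil => simp [PySem.List.enumerate_nil, pvLastIdx]
  | cons x t ih =>
    rw [PySem.List.enumerate_cons, List.foldl_cons]
    rw [ih]
    show _ = (match pvLastIdx (x :: t) p s with | some j => some j | none => d.get? p)
    cases hlast : pvLastIdx t p (s + 1) with
    | some j => simp [pvLastIdx, hlast]
    | none =>
      simp only [pvLastIdx, hlast]
      by_cases hpx : p = x
      · subst hpx; rw [PySem.Dict.get?_insert_self]; simp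
      · rw [PySem.Dict.get?_insert_of_ne _ _ hpx]
        simp [Ne.symm hpx]

lemma pvFirstIdx_some (l : List Int) (p : Int) (s : Int) (i : Int)
    (h : pvFirstIdx l p s = some i) : ∃ k : Nat, i = s + k ∧ l[k]? = some p := by
  induction l generalizing s with
  | nil => simp [pvFirstIdx] at h
  | cons x t ih =>
    by_cases hx : x = p
    · simp only [pvFirstIdx, hx, if_true, Option.some.injEq] at h
      exact ⟨0, by omega, by simp [hx]⟩
    · simp only [pvFirstIdx, hx, if_false] at h
      obtain ⟨k, hk, hget⟩ := ih (s + 1) h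
      exact ⟨k + 1, by push_cast; omega, by simpa using hget⟩

lemma pvFirstIdx_le (l : List Int) (p : Int) (s : Int) (k : Nat) (hk : l[k]? = some p) :
    ∃ i, pvFirstIdx l p s = some i ∧ i ≤ s + k := by
  induction l generalizing s k with
  | nil => simp at hk
  | cons x t ih =>
    by_cases hx : x = p
    · exact ⟨s, by simp [pvFirstIdx, hx], by omega⟩
    · cases k with
      | zero => simp [hx] at hk
      | succ k' =>
        simp only [List.getElem?_cons_succ] at hk
        obtain ⟨i, hi, hle⟩ := ih (s + 1) k' hk
        exact ⟨i, by simp [pvFirstIdx, hx, hi], by push_cast at hle ⊢; omega⟩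

lemma pvLastIdx_some (l : List Int) (p : Int) (s : Int) (j : Int)
    (h : pvLastIdx l p s = some j) : ∃ k : Nat, j = s + k ∧ l[k]? = some p := by
  induction l generalizing s with
  | nil => simp [pvLastIdx] at h
  | cons x t ih =>
    cases hlast : pvLastIdx t p (s + 1) with
    | some j' =>
      rw [pvLastIdx, hlast] at h
      obtain rfl : j' = j := by simpa using h
      obtain ⟨k, hk, hget⟩ := ih (s + 1) hlast
      exact ⟨k + 1, by push_cast; omega, by simpa using hget⟩
    | none =>
      rw [pvLastIdx, hlast] at h
      by_cases hx : x = p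
      · simp only [hx, if_true, Option.some.injEq] at h
        exact ⟨0, by omega, by simp [hx]⟩
      · simp [hx] at h

lemma pvLastIdx_ge (l : List Int) (p : Int) (s : Int) (k : Nat) (hk : l[k]? = some p) :
    ∃ j, pvLastIdx l p s = some j ∧ s + k ≤ j := by
  induction l generalizing s k with
  | nil => simp at hk
  | cons x t ih =>
    cases k with
    | zero =>
      simp only [List.getElem?_cons_zero, Option.some.injEq] at hk
      cases hlast : pvLastIdx t p (s + 1) with
      | some j' =>
        obtain ⟨k', hk', _⟩ := pvLastIdx_some t p (s + 1) j' hlast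
        exact ⟨j', by simp [pvLastIdx, hlast], by omega⟩
      | none => exact ⟨s, by simp [pvLastIdx, hlast, hk], by omega⟩
    | succ k' =>
      simp only [List.getElem?_cons_succ] at hk
      obtain ⟨j, hj, hle⟩ := ih (s + 1) k' hk
      exact ⟨j, by simp [pvLastIdx, hj], by push_cast at hle ⊢; omega⟩

lemma pvBadA_iff (rules : List (Int × List Int)) (printed l : List Int) :
    pvBadA rules printed l = true ↔
      ∃ (j : Nat) (p : Int) (afters : List Int), l[j]? = some p ∧
        (PySem.Dict.mk rules).get? p = some afters ∧
        ∃ a ∈ afters, a ∈ printed ++ l.take j := by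
  induction l generalizing printed with
  | nil => simp [pvBadA]
  | cons q t ih =>
    rw [pvBadA, Bool.or_eq_true, ih]
    constructor
    · rintro (hhead | ⟨j, p, afters, hget, hlook, a, ha, hmem⟩)
      · cases hq : (PySem.Dict.mk rules).get? q with
        | none => rw [hq] at hhead; simp at hhead
        | some afters =>
          rw [hq, List.any_eq_true] at hhead
          obtain ⟨a, ha, hmem⟩ := hhead
          exact ⟨0, q, afters, by simp, hq, a, ha, by simpa using hmem⟩
      · refine ⟨j + 1, p, afters, by simpa using hget, hlook, a, ha, ?_⟩
        simpa [List.append_assoc] using hmem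
    · rintro ⟨j, p, afters, hget, hlook, a, ha, hmem⟩
      cases j with
      | zero =>
        left
        obtain rfl : q = p := by simpa using hget
        rw [hlook, List.any_eq_true]
        exact ⟨a, ha, by simpa using hmem⟩
      | succ j' =>
        right
        refine ⟨j', p, afters, by simpa using hget, hlook, a, ha, ?_⟩
        simpa [List.append_assoc] using hmem

lemma pvWrong_eq (rules : List (Int × List Int)) (l : List Int) :
    pvBadA rules [] l =
      (((PySem.List.enumerate l 0).foldl (fun d ip => d.insert ip.2 ip.1) (PySem.Dict.empty : PySem.Dict Int Int)).keys.any (fun page =>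
        match (PySem.Dict.mk rules).get? page with
        | some afters =>
          match ((PySem.List.enumerate l 0).foldl (fun d ip => d.insert ip.2 ip.1) PySem.Dict.empty).get? page with
          | some j => afters.any (fun a =>
              match ((PySem.List.enumerate l 0).foldl (fun d ip => if d.contains ip.2 then d else d.insert ip.2 ip.1) PySem.Dict.empty).get? a with
              | some i => decide (i < j)
              | none => false)
          | none => false
        | none => false)) := by
  have hkeys : ((PySem.List.enumerate l 0).foldl (fun d ip => d.insert ip.2 ip.1) (PySem.Dict.empty : PySem.Dict Int Int)).keys
      = PySem.Set.ofList l := by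
    rw [PySem.Dict.keys_foldl_insert_key (key := fun ip : Int × Int => ip.2) (f := fun _ ip => ip.1)]
    rw [PySem.List.map_snd_enumerate]
    simp [PySem.Set.update, PySem.Set.ofList_eq_foldl, PySem.Dict.keys_empty]
  rw [Bool.eq_iff_iff, pvBadA_iff, List.any_eq_true]
  constructor
  · rintro ⟨j, p, afters, hget, hlook, a, ha, hmem⟩
    simp only [List.nil_append] at hmem
    obtain ⟨k, hka⟩ := List.mem_iff_getElem?.mp hmem
    rw [List.getElem?_take] at hka
    have hkj : k < j := by by_contra hc; simp [hc] at hka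
    have hla : l[k]? = some a := by simpa [hkj] using hka
    obtain ⟨j', hj', hgej⟩ := pvLastIdx_ge l p 0 j hget
    obtain ⟨i, hi, hlei⟩ := pvFirstIdx_le l a 0 k hla
    refine ⟨p, ?_, ?_⟩
    · rw [hkeys, PySem.Set.mem_ofList]
      exact List.mem_iff_getElem?.mpr ⟨j, hget⟩
    · rw [hlook]
      simp only [pvMaxFold_enum, pvMinFold_enum, PySem.Dict.get?_empty]
      rw [hj', List.any_eq_true]
      refine ⟨a, ha, ?_⟩
      rw [hi]
      simp only [decide_eq_true_eq]
      omega
  · rintro ⟨page, _, hb⟩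
    cases hlook : (PySem.Dict.mk rules).get? page with
    | none => rw [hlook] at hb; simp at hb
    | some afters =>
      rw [hlook] at hb
      simp only [pvMaxFold_enum, pvMinFold_enum, PySem.Dict.get?_empty] at hb
      cases hlast : pvLastIdx l page 0 with
      | none => rw [hlast] at hb; simp at hb
      | some j =>
        rw [hlast, List.any_eq_true] at hb
        obtain ⟨a, ha, hba⟩ := hb
        cases hfirst : pvFirstIdx l a 0 with
        | none => rw [hfirst] at hba; simp at hba
        | some i =>
          rw [hfirst] at hba
          have hij : i < j := by simpa using hba
          obtain ⟨kj, hkj, hkjget⟩ := pvLastIdx_some l page 0 j hlast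
          obtain ⟨ki, hki, hkiget⟩ := pvFirstIdx_some l a 0 i hfirst
          refine ⟨kj, page, afters, hkjget, hlook, a, ha, ?_⟩
          simp only [List.nil_append]
          rw [List.mem_iff_getElem?]
          refine ⟨ki, ?_⟩
          rw [List.getElem?_take, if_pos (by omega)]
          exact hkiget

-- ===== VERDICT (by name: the statement is the Claim_ definition above) =====
theorem filterIncorrectOrders_spec : Claim_equal_filterIncorrectOrders := by
  intro orders rules _
  unfold Spec_filterIncorrectOrders filterIncorrectOrders filterIncorrectOrders_alt
  congr 1
  funext acc po
  dsimp only []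
  rw [pvFoldA]
  rw [PySem.List.foldl_prod_mk
      (f := fun (d : PySem.Dict Int Int) (ip : Int × Int) => if d.contains ip.2 then d else d.insert ip.2 ip.1)
      (g := fun (d : PySem.Dict Int Int) (ip : Int × Int) => d.insert ip.2 ip.1)]
  simp only [Bool.false_or]
  rw [pvWrong_eq rules po]
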